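-- pv_equiv track=rewrite | github.com/vishrutkmr7/DailyPracticeProblemsDIP | 2019/11 November/dp11122019.py | fix_brackets
-- ===== SOURCE A (Python) =====
-- def fix_brackets(s):
--     # Fill this in.
--     op = 0
--     for brace in s:
--         if brace == "(":
--             op += 1
--         elif brace == ")":
--             op -= 1
--     return abs(op)
-- ===== SOURCE B (Python) =====
-- def fix_brackets(s):
--     # Divide and conquer: the signed balance of a string is the sum of the
--     # balances of its halves; recurse down to single characters, abs at the top.
--     def bal(t):
--         if len(t) <= 1:
--             return 1 if t == "(" else (-1 if t == ")" else 0)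
--         m = len(t) // 2
--         return bal(t[:m]) + bal(t[m:])
--     return abs(bal(s))
-- ===== Notes on version B (the rewrite author's own statement) =====
-- stated objective: alternative
-- what changed: Replaces the incremental left-to-right running-balance loop with a divide-and-conquer recursion that splits the string in half, sums the signed balances of the halves, and takes abs of the total.
import Mathlib
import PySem

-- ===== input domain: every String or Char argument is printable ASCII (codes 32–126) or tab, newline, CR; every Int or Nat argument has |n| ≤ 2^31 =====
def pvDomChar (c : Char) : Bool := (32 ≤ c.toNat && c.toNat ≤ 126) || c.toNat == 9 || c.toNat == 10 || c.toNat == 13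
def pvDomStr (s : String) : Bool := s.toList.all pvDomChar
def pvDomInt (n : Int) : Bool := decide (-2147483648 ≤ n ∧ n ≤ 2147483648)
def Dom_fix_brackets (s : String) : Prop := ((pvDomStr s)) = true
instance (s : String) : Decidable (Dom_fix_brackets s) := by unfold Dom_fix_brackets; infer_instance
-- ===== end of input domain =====

-- B replaces A's left-to-right running-balance loop with a divide-and-conquer recursion
-- (split in half, sum the halves' signed balances, abs at the top); objective: alternative.

-- ===== PORT A =====
def fix_brackets (s : String) : Int :=
  let op : Int :=
    s.toList.foldl (fun op brace =>
      if brace == '(' then op + 1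
      else if brace == ')' then op - 1
      else op) 0
  |op|

-- ===== PORT B =====
-- bal t: base case len(t) ≤ 1 inspects the single character (or empty), else splits at len//2.
def pvBal (l : List Char) : Int :=
  if h : l.length ≤ 1 then
    (if l = ['('] then 1 else if l = [')'] then -1 else 0)
  else
    pvBal (l.take (l.length / 2)) + pvBal (l.drop (l.length / 2))
termination_by l.length
decreasing_by
  · simp only [List.length_take]
    omega
  · simp only [List.length_drop]
    omega

def fix_brackets_alt (s : String) : Int := |pvBal s.toList|

-- ===== PRECONDITION & SPEC =====
def Spec_fix_brackets (s : String) (out : Int) : Prop := out = fix_brackets_alt s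
instance (s : String) (out : Int) : Decidable (Spec_fix_brackets s out) := by unfold Spec_fix_brackets; infer_instance

-- ===== CLAIM (what is proved, stated in full; the proofs are below) =====
def Claim_equal_fix_brackets : Prop := ∀ (s : String), Dom_fix_brackets s → Spec_fix_brackets s (fix_brackets s)

-- ===== LEMMAS AND PROOFS =====

-- B's divide-and-conquer balance equals (count '(') - (count ')').
theorem pvBal_eq_counts_aux (n : Nat) : ∀ l : List Char, l.length ≤ n →
    pvBal l = (l.count '(' : Int) - (l.count ')' : Int) := by
  induction n with
  | zero =>
    intro l hl
    have : l = [] := List.length_eq_zero_iff.mp (Nat.le_zero.mp hl)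
    subst this
    simp [pvBal]
  | succ n ih =>
    intro l hl
    by_cases h : l.length ≤ 1
    · rw [pvBal]
      simp only [h, dif_pos]
      match l, h with
      | [], _ => simp
      | [c], _ =>
        by_cases h1 : c = '('
        · simp [h1]
        · by_cases h2 : c = ')'
          · simp [h2]
          · simp [h1, h2]
    · rw [pvBal]
      simp only [h, dif_neg, not_false_iff]
      have hm1 : (l.take (l.length / 2)).length ≤ n := by
        simp only [List.length_take]; omega
      have hm2 : (l.drop (l.length / 2)).length ≤ n := by
        simp only [List.length_drop]; omega
      rw [ih _ hm1, ih _ hm2]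
      conv_rhs => rw [← List.take_append_drop (l.length / 2) l]
      simp only [List.count_append]
      push_cast
      ring

theorem pvBal_eq_counts (l : List Char) :
    pvBal l = (l.count '(' : Int) - (l.count ')' : Int) :=
  pvBal_eq_counts_aux l.length l le_rfl

-- A's running balance equals (count '(') - (count ')').
theorem foldl_balance (l : List Char) (a : Int) :
    l.foldl (fun op brace =>
      if brace == '(' then op + 1
      else if brace == ')' then op - 1
      else op) a = a + (l.count '(' : Int) - (l.count ')' : Int) := by
  induction l generalizing a with
  | nil => simp
  | cons x t ih =>
    simp only [List.foldl_cons, ih, List.count_cons]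
    by_cases h1 : x = '('
    · subst h1; simp; ring
    · by_cases h2 : x = ')'
      · subst h2; simp; ring
      · simp [h1, h2]

-- ===== VERDICT (by name: the statement is the Claim_ definition above) =====
theorem fix_brackets_spec : Claim_equal_fix_brackets := by
  intro s _
  unfold Spec_fix_brackets fix_brackets fix_brackets_alt
  rw [foldl_balance, pvBal_eq_counts]
  ring_nf
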